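-- pv_equiv track=rewrite | github.com/Britwizard/PBNCreator | PBNPrintHandRecords.py | Calculate_HCP
-- ===== SOURCE A (Python) =====
-- HCP_values={'A':4,'K':3,'Q':2,'J':1}
--
-- def Calculate_HCP(sorted_hands):
--     HCP_list=[]
--     for hand in sorted_hands:
--         HCP=0
--         if hand=='':
--             continue
--         for card in hand:
--             if card.isalpha() and card != 'T':
--                 HCP+=HCP_values[card]
--         HCP_list.append(str(HCP))
--     return(HCP_list)
-- ===== SOURCE B (Python) =====
-- def Calculate_HCP(sorted_hands):
--     return [str(4 * hand.count('A') + 3 * hand.count('K')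
--                 + 2 * hand.count('Q') + hand.count('J'))
--             for hand in sorted_hands if hand != '']
-- ===== Notes on version B (the rewrite author's own statement) =====
-- stated objective: simpler
-- what changed: Replaces the per-card loop with dict lookups by a single comprehension using a closed-form score 4*count('A')+3*count('K')+2*count('Q')+count('J') per hand; no dict and no inner branch remain.
import Mathlib
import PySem

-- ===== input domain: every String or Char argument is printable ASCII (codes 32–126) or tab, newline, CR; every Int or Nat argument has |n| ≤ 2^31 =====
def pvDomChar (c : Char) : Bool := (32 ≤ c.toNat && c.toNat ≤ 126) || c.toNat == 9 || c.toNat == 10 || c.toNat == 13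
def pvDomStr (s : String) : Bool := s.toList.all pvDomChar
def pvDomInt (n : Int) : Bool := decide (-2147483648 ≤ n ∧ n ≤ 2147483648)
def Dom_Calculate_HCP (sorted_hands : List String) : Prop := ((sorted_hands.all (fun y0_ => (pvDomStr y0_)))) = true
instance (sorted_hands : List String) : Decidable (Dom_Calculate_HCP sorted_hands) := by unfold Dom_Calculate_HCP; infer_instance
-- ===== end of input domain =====

-- B replaces A's per-card loop + dict lookup by a per-hand closed-form honor count (simpler);
-- inputs where A raises KeyError (an alphabetic card outside A/K/Q/J/T) are excluded by Pre_.

-- ===== PORT A =====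
-- the module constant HCP_values
def pvHCPvalues : PySem.Dict Char Int :=
  (((PySem.Dict.empty.insert 'A' 4).insert 'K' 3).insert 'Q' 2).insert 'J' 1

-- inner 'for card in hand' loop; none = KeyError from HCP_values[card]
def pvHandHCP? (cs : List Char) : Option Int :=
  cs.foldl (fun acc c => acc.bind (fun h =>
    if PySem.Chars.isalpha c && c != 'T' then (pvHCPvalues.get? c).map (fun v => h + v)
    else some h)) (some 0)

-- outer 'for hand in sorted_hands' loop with the HCP_list accumulator; none = KeyError aborts the call
def pvLoopA : List String → List String → Option (List String)
  | [], acc => some acc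
  | hand :: rest, acc =>
    if hand = "" then pvLoopA rest acc
    else match pvHandHCP? hand.toList with
      | none => none
      | some hcp => pvLoopA rest (acc ++ [PySem.Int.toStr hcp])

def Calculate_HCP (sorted_hands : List String) : List String :=
  (pvLoopA sorted_hands []).getD []

-- ===== PORT B =====
-- str(4*hand.count('A') + 3*hand.count('K') + 2*hand.count('Q') + hand.count('J'))
def pvHandScore (hand : String) : Int :=
  4 * (PySem.Str.count hand "A" : Int) + 3 * (PySem.Str.count hand "K" : Int)
    + 2 * (PySem.Str.count hand "Q" : Int) + (PySem.Str.count hand "J" : Int)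

def Calculate_HCP_alt (sorted_hands : List String) : List String :=
  (sorted_hands.filter (fun hand => hand ≠ "")).map
    (fun hand => PySem.Int.toStr (pvHandScore hand))

-- ===== PRECONDITION & SPEC =====
-- Pre_ excludes exactly the inputs where A raises KeyError: a hand with an alphabetic card other than A/K/Q/J/T
def Pre_Calculate_HCP (sorted_hands : List String) : Prop :=
  (sorted_hands.all (fun hand => hand.toList.all (fun c =>
    !PySem.Chars.isalpha c || (c == 'A' || c == 'K' || c == 'Q' || c == 'J' || c == 'T')))) = true
instance (sorted_hands : List String) : Decidable (Pre_Calculate_HCP sorted_hands) := by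
  unfold Pre_Calculate_HCP; infer_instance

def pvWitness_Calculate_HCP : List String := ["AKQJT2", "", "T98.2"]

def Spec_Calculate_HCP (sorted_hands : List String) (out : List String) : Prop :=
  out = Calculate_HCP_alt sorted_hands
instance (sorted_hands : List String) (out : List String) : Decidable (Spec_Calculate_HCP sorted_hands out) := by
  unfold Spec_Calculate_HCP; infer_instance

-- ===== CLAIM (what is proved, stated in full; the proofs are below) =====
def Claim_equal_Calculate_HCP : Prop := ∀ (sorted_hands : List String), Dom_Calculate_HCP sorted_hands → Pre_Calculate_HCP sorted_hands → Spec_Calculate_HCP sorted_hands (Calculate_HCP sorted_hands)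

-- ===== LEMMAS AND PROOFS =====

-- score of a hand as list counts
def pvScoreL (cs : List Char) : Int :=
  4 * (cs.count 'A' : Int) + 3 * (cs.count 'K' : Int) + 2 * (cs.count 'Q' : Int) + (cs.count 'J' : Int)

-- PySem.Chars.count for a single-character needle is List.count
theorem pvCountGoSingle (a : Char) : ∀ (fuel : Nat) (l : List Char) (acc : Nat),
    l.length ≤ fuel → PySem.Chars.count.go [a] fuel l acc = acc + l.count a := by
  intro fuel
  induction fuel with
  | zero => intro l acc h; match l with
    | [] => simp [PySem.Chars.count.go]
    | c :: t => simp at h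
  | succ n ih =>
    intro l acc h
    match l with
    | [] => simp [PySem.Chars.count.go]
    | c :: t =>
      simp only [PySem.Chars.count.go]
      by_cases hc : c = a
      · simp [hc, List.isPrefixOf, ih t (acc + 1) (by simpa using h)]
        omega
      · simp [List.isPrefixOf, Ne.symm hc, hc, ih t acc (by simpa using h)]

theorem pvCountSingle (cs : List Char) (a : Char) : PySem.Chars.count cs [a] = cs.count a := by
  simp [PySem.Chars.count, pvCountGoSingle a cs.length cs 0 le_rfl]

theorem pvHandScore_eq (hand : String) : pvHandScore hand = pvScoreL hand.toList := by
  simp [pvHandScore, pvScoreL, PySem.Str.count_eq, pvCountSingle]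

def pvGoodHand (cs : List Char) : Prop :=
  (cs.all (fun c => !PySem.Chars.isalpha c || (c == 'A' || c == 'K' || c == 'Q' || c == 'J' || c == 'T'))) = true

-- value the inner branch adds for one card of a good hand
def pvVal (c : Char) : Int :=
  if c = 'A' then 4 else if c = 'K' then 3 else if c = 'Q' then 2 else if c = 'J' then 1 else 0

theorem pvScoreL_cons (c : Char) (t : List Char) : pvScoreL (c :: t) = pvVal c + pvScoreL t := by
  simp only [pvScoreL, pvVal, List.count_cons]
  split_ifs <;> push_cast <;> simp_all <;> ring

-- on a good hand A's inner loop returns the closed-form score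
theorem pvInner_eq : ∀ (cs : List Char) (h : Int), pvGoodHand cs →
    cs.foldl (fun acc c => acc.bind (fun h =>
      if PySem.Chars.isalpha c && c != 'T' then (pvHCPvalues.get? c).map (fun v => h + v)
      else some h)) (some h) = some (h + pvScoreL cs) := by
  intro cs
  induction cs with
  | nil => intro h _; simp [pvScoreL]
  | cons c t ih =>
    intro h hg
    have hg' := hg
    simp only [pvGoodHand, List.all_cons, Bool.and_eq_true] at hg'
    obtain ⟨hgc, hgt⟩ := hg'
    rw [List.foldl_cons]
    have hstep : ((some h).bind fun x =>
        if PySem.Chars.isalpha c && c != 'T' then (pvHCPvalues.get? c).map (fun v => x + v)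
        else some x) = some (h + pvVal c) := by
      by_cases hA : c = 'A'
      · subst hA; rfl
      by_cases hK : c = 'K'
      · subst hK; rfl
      by_cases hQ : c = 'Q'
      · subst hQ; rfl
      by_cases hJ : c = 'J'
      · subst hJ; rfl
      have h0 : pvVal c = 0 := by simp [pvVal, hA, hK, hQ, hJ]
      by_cases hT : c = 'T'
      · subst hT; simp [h0]
      · have halpha : PySem.Chars.isalpha c = false := by
          simp [hA, hK, hQ, hJ, hT] at hgc
          simpa using hgc
        simp [halpha, h0]
    rw [hstep, ih (h + pvVal c) (by simpa [pvGoodHand] using hgt), pvScoreL_cons]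
    ring_nf

theorem pvHandHCP?_eq (cs : List Char) (hg : pvGoodHand cs) : pvHandHCP? cs = some (pvScoreL cs) := by
  unfold pvHandHCP?
  rw [pvInner_eq cs 0 hg]
  simp

theorem pvLoopA_eq : ∀ (hands : List String) (acc : List String),
    (hands.all (fun hand => hand.toList.all (fun c =>
      !PySem.Chars.isalpha c || (c == 'A' || c == 'K' || c == 'Q' || c == 'J' || c == 'T')))) = true →
    pvLoopA hands acc = some (acc ++ (hands.filter (fun hand => hand ≠ "")).map
      (fun hand => PySem.Int.toStr (pvHandScore hand))) := by
  intro hands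
  induction hands with
  | nil => intro acc _; simp [pvLoopA]
  | cons hand rest ih =>
    intro acc hp
    simp only [List.all_cons, Bool.and_eq_true] at hp
    by_cases he : hand = ""
    · simp [pvLoopA, he, ih acc hp.2]
    · rw [pvLoopA, if_neg he, pvHandHCP?_eq hand.toList hp.1]
      simp [he, ih _ hp.2, pvHandScore_eq]

-- ===== VERDICT (by name: the statement is the Claim_ definition above) =====
theorem Calculate_HCP_spec : Claim_equal_Calculate_HCP := by
  intro sorted_hands _ hpre
  unfold Spec_Calculate_HCP Calculate_HCP Calculate_HCP_alt
  rw [pvLoopA_eq sorted_hands [] hpre]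
  simp
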